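-- pv_equiv track=rewrite | github.com/RafaelHinojosa/Deteccion-de-Plagio | visualizacion.py | process_code2
-- ===== SOURCE A (Python) =====
-- def process_code2(text):
--   punctuation = ["_", "-", ".", ":", ",", ";", "(", ")", "?", "¿", "¡", "!", '"', "{", "}", "[", "]", "+", "*", "=", "/", "%", "<", ">"]
--   punctuation2 = ["{", "}"]
--
--   for i in punctuation2:
--       text = text.replace(i, " ")
--
--   for i in punctuation:
--       text = text.replace(i, " " + i + " ")
--
--   text = text.lower()
--
--   return text
-- ===== SOURCE B (Python) =====
-- def process_code2(text):
--     # One left-to-right scan instead of 26 .replace() passes.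
--     pad = set('_-.:,;()?\u00bf\u00a1!"[]+*=/%<>')
--     pieces = []
--     for c in text:
--         if c == '{' or c == '}':
--             pieces.append(' ')
--         elif c in pad:
--             pieces.append(' ' + c + ' ')
--         else:
--             pieces.append(c)
--     return ''.join(pieces).lower()
-- ===== Notes on version B (the rewrite author's own statement) =====
-- stated objective: simpler
-- what changed: B rebuilds the string in one left-to-right scan over the characters (braces become a single space, other listed punctuation is padded with spaces, then the whole result is lowercased) instead of A's 26 sequential .replace() passes over the whole string.
import Mathlib
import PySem

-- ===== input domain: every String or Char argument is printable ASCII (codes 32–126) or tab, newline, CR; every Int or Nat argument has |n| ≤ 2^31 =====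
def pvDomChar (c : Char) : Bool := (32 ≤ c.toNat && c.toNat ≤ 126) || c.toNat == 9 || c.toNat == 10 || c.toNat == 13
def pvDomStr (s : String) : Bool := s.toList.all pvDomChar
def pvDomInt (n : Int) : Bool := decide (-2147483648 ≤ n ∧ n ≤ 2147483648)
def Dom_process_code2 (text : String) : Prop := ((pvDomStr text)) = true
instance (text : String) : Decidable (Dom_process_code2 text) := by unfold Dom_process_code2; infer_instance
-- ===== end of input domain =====

set_option maxHeartbeats 1000000

-- B replaces A's 26 sequential `.replace()` passes by ONE left-to-right scan over the characters (same return value; objective: simpler single-pass algorithm).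

-- ===== PORT A =====
def process_code2 (text : String) : String :=
  let punctuation : List String := ["_", "-", ".", ":", ",", ";", "(", ")", "?", "¿", "¡", "!", "\"", "{", "}", "[", "]", "+", "*", "=", "/", "%", "<", ">"]
  let punctuation2 : List String := ["{", "}"]
  let text1 := punctuation2.foldl (fun t i => PySem.Str.replace t i " ") text
  -- Python's " " + i + " " (string concatenation) is ported exactly via the character list
  let text2 := punctuation.foldl
    (fun t i => PySem.Str.replace t i (String.ofList (' ' :: i.toList ++ [' ']))) text1
  PySem.Str.lower text2

-- ===== PORT B =====
def pvPad : List Char := ['_', '-', '.', ':', ',', ';', '(', ')', '?', '¿', '¡', '!', '\"', '[', ']', '+', '*', '=', '/', '%', '<', '>']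

def pvPiece (c : Char) : List Char :=
  if c = '{' ∨ c = '}' then [' ']
  else if c ∈ pvPad then [' ', c, ' ']
  else [c]

def process_code2_alt (text : String) : String :=
  -- ''.join(pieces).lower() : the per-character pieces are concatenated by flatMap, then lowered
  PySem.Str.lower (String.ofList (text.toList.flatMap pvPiece))

-- ===== PRECONDITION & SPEC =====
def Spec_process_code2 (text : String) (out : String) : Prop := out = process_code2_alt text
instance (text : String) (out : String) : Decidable (Spec_process_code2 text out) := by unfold Spec_process_code2; infer_instance

-- ===== CLAIM (what is proved, stated in full; the proofs are below) =====
def Claim_equal_process_code2 : Prop := ∀ (text : String), Dom_process_code2 text → Spec_process_code2 text (process_code2 text)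

-- ===== LEMMAS AND PROOFS =====

-- s.replace(old, new) for a single-character old is the flatMap of a per-character substitution
theorem pv_go_single (p : Char) (new : List Char) :
    ∀ (fuel : Nat) (l acc : List Char), l.length ≤ fuel →
      PySem.Chars.replace.go [p] new fuel l acc
        = acc.reverse ++ l.flatMap (fun c => if c = p then new else [c]) := by
  intro fuel
  induction fuel with
  | zero =>
    intro l acc h
    cases l with
    | nil => simp [PySem.Chars.replace.go]
    | cons c t => simp at h
  | succ n ih =>
    intro l acc h
    cases l with
    | nil => simp [PySem.Chars.replace.go]
    | cons c t =>
      by_cases hc : c = p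
      · subst hc
        have hpre : List.isPrefixOf [c] (c :: t) = true := by simp [List.isPrefixOf]
        rw [PySem.Chars.replace.go.eq_def]
        simp only [hpre, if_pos, List.length_cons, List.length_nil, List.drop_succ_cons, List.drop_zero]
        rw [ih t (new.reverse ++ acc) (by simpa using Nat.le_of_succ_le_succ h)]
        simp
      · have hpre : List.isPrefixOf [p] (c :: t) = false := by
          simp [List.isPrefixOf]; exact fun hh => (hc hh.symm).elim
        rw [PySem.Chars.replace.go.eq_def]
        simp only [hpre]
        rw [ih t (c :: acc) (by simpa using Nat.le_of_succ_le_succ h)]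
        simp [hc]

theorem pv_repl1 (s : String) (i new : String) (p : Char) (h : i.toList = [p]) :
    (PySem.Str.replace s i new).toList
      = s.toList.flatMap (fun c => if c = p then new.toList else [c]) := by
  rw [PySem.Str.toList_replace, h]
  rw [PySem.Chars.replace]
  simp only [List.isEmpty_cons]
  exact (pv_go_single p new.toList s.toList.length s.toList [] (le_refl _)).trans (by simp)

-- the whole replace pipeline of A, as one nested flatMap over the character list
def pvPipe (l : List Char) : List Char :=
  ((((((((((((((((((((((((((((((((((((((((((((((((((((l).flatMap (fun c => if c = '{' then (" " : String).toList else [c]))).flatMap (fun c => if c = '}' then (" " : String).toList else [c]))).flatMap (fun c => if c = '_' then (String.ofList ([' ', '_'] ++ [' '])).toList else [c]))).flatMap (fun c => if c = '-' then (String.ofList (' ' :: ("-" : String).toList ++ [' '])).toList else [c]))).flatMap (fun c => if c = '.' then (String.ofList (' ' :: ("." : String).toList ++ [' '])).toList else [c]))).flatMap (fun c => if c = ':' then (String.ofList (' ' :: (":" : String).toList ++ [' '])).toList else [c]))).flatMap (fun c => if c = ',' then (String.ofList (' ' :: ("," : String).toList ++ [' '])).toList else [c]))).flatMap (fun c =>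 if c = ';' then (String.ofList (' ' :: (";" : String).toList ++ [' '])).toList else [c]))).flatMap (fun c => if c = '(' then (String.ofList (' ' :: ("(" : String).toList ++ [' '])).toList else [c]))).flatMap (fun c => if c = ')' then (String.ofList (' ' :: (")" : String).toList ++ [' '])).toList else [c]))).flatMap (fun c => if c = '?' then (String.ofList (' ' :: ("?" : String).toList ++ [' '])).toList else [c]))).flatMap (fun c => if c = '¿' then (String.ofList (' ' :: ("¿" : String).toList ++ [' '])).toList else [c]))).flatMap (fun c => if c = '¡' then (String.ofList (' ' :: ("¡" : String).toList ++ [' '])).toList else [c]))).flatMap (fun c => if c = '!' then (String.ofList (' ' :: ("!" : String).toList ++ [' '])).toList else [c]))).flatMap (fun c => if c = '\"' then (String.ofList (' ' :: ("\"" : String).toList ++ [' '])).toList else [c]))).flatMap (fun c => if c = '{' then (String.ofList (' ' :: ("{" : String).toList ++ [' '])).toList else [c]))).flatMap (fun c => if c = '}' then (String.ofList (' ' :: ("}" : String).toList ++ [' '])).toList else [c]))).flatMap (fun c => if c = '[' then (String.ofList (' ' :: ("[" : String).toList ++ [' '])).toList else [c]))).flatMap (fun c => if c = ']' then (String.ofList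 (' ' :: ("]" : String).toList ++ [' '])).toList else [c]))).flatMap (fun c => if c = '+' then (String.ofList (' ' :: ("+" : String).toList ++ [' '])).toList else [c]))).flatMap (fun c => if c = '*' then (String.ofList (' ' :: ("*" : String).toList ++ [' '])).toList else [c]))).flatMap (fun c => if c = '=' then (String.ofList (' ' :: ("=" : String).toList ++ [' '])).toList else [c]))).flatMap (fun c => if c = '/' then (String.ofList (' ' :: ("/" : String).toList ++ [' '])).toList else [c]))).flatMap (fun c => if c = '%' then (String.ofList (' ' :: ("%" : String).toList ++ [' '])).toList else [c]))).flatMap (fun c => if c = '<' then (String.ofList (' ' :: ("<" : String).toList ++ [' '])).toList else [c]))).flatMap (fun c => if c = '>' then (String.ofList (' ' :: (">" : String).toList ++ [' '])).toList else [c]))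

theorem pvPipe_cons (c : Char) (l : List Char) : pvPipe (c :: l) = pvPipe [c] ++ pvPipe l := by
  simp [pvPipe, List.flatMap_append]

theorem pvPipe_single (c : Char) : pvPipe [c] = pvPiece c := by
  by_cases h0 : c = '_'
  · subst h0; decide
  by_cases h1 : c = '-'
  · subst h1; decide
  by_cases h2 : c = '.'
  · subst h2; decide
  by_cases h3 : c = ':'
  · subst h3; decide
  by_cases h4 : c = ','
  · subst h4; decide
  by_cases h5 : c = ';'
  · subst h5; decide
  by_cases h6 : c = '('
  · subst h6; decide
  by_cases h7 : c = ')'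
  · subst h7; decide
  by_cases h8 : c = '?'
  · subst h8; decide
  by_cases h9 : c = '¿'
  · subst h9; decide
  by_cases h10 : c = '¡'
  · subst h10; decide
  by_cases h11 : c = '!'
  · subst h11; decide
  by_cases h12 : c = '\"'
  · subst h12; decide
  by_cases h13 : c = '{'
  · subst h13; decide
  by_cases h14 : c = '}'
  · subst h14; decide
  by_cases h15 : c = '['
  · subst h15; decide
  by_cases h16 : c = ']'
  · subst h16; decide
  by_cases h17 : c = '+'
  · subst h17; decide
  by_cases h18 : c = '*'
  · subst h18; decide
  by_cases h19 : c = '='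
  · subst h19; decide
  by_cases h20 : c = '/'
  · subst h20; decide
  by_cases h21 : c = '%'
  · subst h21; decide
  by_cases h22 : c = '<'
  · subst h22; decide
  by_cases h23 : c = '>'
  · subst h23; decide
  simp [pvPipe, pvPiece, pvPad, h0, h1, h2, h3, h4, h5, h6, h7, h8, h9, h10, h11, h12, h13, h14, h15, h16, h17, h18, h19, h20, h21, h22, h23]

theorem pvPipe_eq (l : List Char) : pvPipe l = l.flatMap pvPiece := by
  induction l with
  | nil => simp [pvPipe]
  | cons c t ih => rw [pvPipe_cons, pvPipe_single, ih, List.flatMap_cons]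

-- ===== VERDICT (by name: the statement is the Claim_ definition above) =====
theorem process_code2_spec : Claim_equal_process_code2 := by
  intro text _
  unfold Spec_process_code2 process_code2 process_code2_alt
  simp only [List.foldl_cons, List.foldl_nil]
  apply congrArg PySem.Str.lower
  apply String.toList_inj.mp
  rw [pv_repl1 _ (">" : String) _ '>' (by decide)]
  rw [pv_repl1 _ ("<" : String) _ '<' (by decide)]
  rw [pv_repl1 _ ("%" : String) _ '%' (by decide)]
  rw [pv_repl1 _ ("/" : String) _ '/' (by decide)]
  rw [pv_repl1 _ ("=" : String) _ '=' (by decide)]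
  rw [pv_repl1 _ ("*" : String) _ '*' (by decide)]
  rw [pv_repl1 _ ("+" : String) _ '+' (by decide)]
  rw [pv_repl1 _ ("]" : String) _ ']' (by decide)]
  rw [pv_repl1 _ ("[" : String) _ '[' (by decide)]
  rw [pv_repl1 _ ("}" : String) _ '}' (by decide)]
  rw [pv_repl1 _ ("{" : String) _ '{' (by decide)]
  rw [pv_repl1 _ ("\"" : String) _ '\"' (by decide)]
  rw [pv_repl1 _ ("!" : String) _ '!' (by decide)]
  rw [pv_repl1 _ ("¡" : String) _ '¡' (by decide)]
  rw [pv_repl1 _ ("¿" : String) _ '¿' (by decide)]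
  rw [pv_repl1 _ ("?" : String) _ '?' (by decide)]
  rw [pv_repl1 _ (")" : String) _ ')' (by decide)]
  rw [pv_repl1 _ ("(" : String) _ '(' (by decide)]
  rw [pv_repl1 _ (";" : String) _ ';' (by decide)]
  rw [pv_repl1 _ ("," : String) _ ',' (by decide)]
  rw [pv_repl1 _ (":" : String) _ ':' (by decide)]
  rw [pv_repl1 _ ("." : String) _ '.' (by decide)]
  rw [pv_repl1 _ ("-" : String) _ '-' (by decide)]
  rw [pv_repl1 _ ("_" : String) _ '_' (by decide)]
  rw [pv_repl1 _ ("}" : String) _ '}' (by decide)]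
  rw [pv_repl1 _ ("{" : String) _ '{' (by decide)]
  rw [String.toList_ofList (l := List.flatMap pvPiece text.toList)]
  have h := pvPipe_eq text.toList
  unfold pvPipe at h
  exact h
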